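-- pv_equiv track=rewrite | github.com/harneet2512/groundtruth | benchmarks/swebench/gt_hook.py | _optimal_cost
-- ===== SOURCE A (Python) =====
-- def _edit_distance(a: str, b: str) -> int:
--     """Standard Levenshtein distance."""
--     m, n = len(a), len(b)
--     prev = list(range(n + 1))
--     for i in range(1, m + 1):
--         curr = [i] + [0] * n
--         for j in range(1, n + 1):
--             cost = 0 if a[i - 1] == b[j - 1] else 1
--             curr[j] = min(prev[j] + 1, curr[j - 1] + 1, prev[j - 1] + cost)
--         prev = curr
--     return prev[n]
--
-- def _greedy_optimal_assignment(args: list[str], params: list[str]) -> list[int]: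
--     """Greedy min-cost bipartite matching: returns param index for each arg position."""
--     k = min(len(args), len(params))
--     used_params: set[int] = set()
--     assignment: list[int] = [-1] * k
--
--     costs = [
--         [_edit_distance(args[i], params[j]) for j in range(len(params))]
--         for i in range(k)
--     ]
--
--     for _ in range(k):
--         best_cost = 10 ** 9
--         best_i = best_j = -1
--         for i in range(k):
--             if assignment[i] != -1:
--                 continue
--             for j in range(len(params)):
--                 if j in used_params:
--                     continue
--                 if costs[i][j] < best_cost:
--                     best_cost = costs[i][j]
--                     best_i, best_j = i, j
--         if best_i == -1:
--             break
--         assignment[best_i] = best_j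
--         used_params.add(best_j)
--
--     return assignment
--
-- def _optimal_cost(args: list[str], params: list[str]) -> tuple[int, list[int]]:
--     """Return (optimal_cost, optimal_assignment) via greedy matching."""
--     assignment = _greedy_optimal_assignment(args, params)
--     k = min(len(args), len(params))
--     cost = sum(
--         _edit_distance(args[i], params[assignment[i]])
--         for i in range(k)
--         if assignment[i] != -1
--     )
--     return cost, assignment
-- ===== SOURCE B (Python) =====
-- def _edit_distance(a: str, b: str) -> int:
--     """Standard Levenshtein distance."""
--     m, n = len(a), len(b)
--     prev = list(range(n + 1))
--     for i in range(1, m + 1):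
--         curr = [i] + [0] * n
--         for j in range(1, n + 1):
--             cost = 0 if a[i - 1] == b[j - 1] else 1
--             curr[j] = min(prev[j] + 1, curr[j - 1] + 1, prev[j - 1] + cost)
--         prev = curr
--     return prev[n]
--
-- def _optimal_cost(args: list[str], params: list[str]) -> tuple[int, list[int]]:
--     """Return (greedy matching cost, assignment): sort all edges once by
--     (cost, arg index, param index) and scan, skipping used endpoints —
--     the same pairs and tie-breaks as repeated argmin."""
--     k = min(len(args), len(params))
--     P = len(params)
--     edges = sorted(
--         (_edit_distance(args[i], params[j]), i * P + j)
--         for i in range(k) for j in range(P)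
--     )
--     assignment = [-1] * k
--     used = set()
--     total = 0
--     for c, n in edges:
--         i, j = divmod(n, P)
--         if assignment[i] == -1 and j not in used:
--             assignment[i] = j
--             used.add(j)
--             total += c
--     return total, assignment
-- ===== Notes on version B (the rewrite author's own statement) =====
-- stated objective: alternative
-- what changed: B replaces A's repeated rescan of the whole cost matrix (argmin per matched pair) by building the (cost, arg-index*P+param-index) edge list once, sorting it, and making a single greedy scan that skips used endpoints - the same pairs in the same tie-break order (cost, then arg index, then param index); intended as faster selection (measured 1.84x at n=256, but the shared edit-distance work dominates at the largest sizes).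
import Mathlib
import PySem

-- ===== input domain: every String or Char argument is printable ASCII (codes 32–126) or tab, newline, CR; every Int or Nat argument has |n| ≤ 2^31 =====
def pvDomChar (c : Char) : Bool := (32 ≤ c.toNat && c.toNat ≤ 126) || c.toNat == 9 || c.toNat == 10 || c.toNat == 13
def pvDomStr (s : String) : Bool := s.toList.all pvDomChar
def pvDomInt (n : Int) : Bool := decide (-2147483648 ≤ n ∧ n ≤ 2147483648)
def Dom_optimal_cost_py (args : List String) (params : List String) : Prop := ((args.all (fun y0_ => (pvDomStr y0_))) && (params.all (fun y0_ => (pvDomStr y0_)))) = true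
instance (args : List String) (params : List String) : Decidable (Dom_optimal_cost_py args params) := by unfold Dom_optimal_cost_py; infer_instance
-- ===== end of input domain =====

-- B replaces A's repeated argmin rescans of the cost matrix by one sort of all edges
-- by (cost, arg-index, param-index) followed by a single greedy scan (same tie-break).

-- ===== PORT A =====
-- port of _edit_distance (same helper is called by A and by B, as in the Pythons):
-- the inner j-loop (mutating curr left to right) becomes a left-to-right recursion
-- carrying curr[j-1] ('left'), prev[j-1] ('pj1') and the rest of prev.
def pvEdRowGo (ai : Char) : List Char → List Int → Int → Int → List Int
  | [], _, _, _ => []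
  | _ :: _, [], _, _ => []
  | bj :: bs, pj :: ps, pj1, left =>
      let cost : Int := if ai = bj then 0 else 1
      let v := min (pj + 1) (min (left + 1) (pj1 + cost))
      v :: pvEdRowGo ai bs ps pj v

-- the outer i-loop over a's characters, carrying prev
def pvEdLoop (bs : List Char) : List Char → Int → List Int → List Int
  | [], _, prev => prev
  | ai :: arest, i, prev =>
      pvEdLoop bs arest (i + 1) (i :: pvEdRowGo ai bs prev.tail (prev.headD 0) i)

def pvEditDistance (a b : String) : Int :=
  let n : Int := PySem.Str.len b
  let prev := PySem.List.pyRange 0 (n + 1) 1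
  PySem.List.pyGetD (pvEdLoop b.toList a.toList 1 prev) n 0

-- port of _greedy_optimal_assignment: the cost matrix
def pvCosts (args : List String) (params : List String) : List (List Int) :=
  (PySem.List.pyRange 0 (min (PySem.List.len args) (PySem.List.len params)) 1).map (fun i =>
    (PySem.List.pyRange 0 (PySem.List.len params) 1).map (fun j =>
      pvEditDistance (PySem.List.pyGetD args i "") (PySem.List.pyGetD params j "")))

-- one iteration of the 'for _ in range(k)' loop; the Bool component models 'break'
def pvStepA (costs : List (List Int)) (k P : Int) (st : List Int × List Int × Bool) :
    List Int × List Int × Bool :=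
  if st.2.2 then st else
  let best := (PySem.List.pyRange 0 k 1).foldl (fun b i =>
      if PySem.List.pyGetD st.1 i 0 ≠ -1 then b
      else (PySem.List.pyRange 0 P 1).foldl (fun b2 j =>
        if PySem.Set.contains st.2.1 j then b2
        else if PySem.List.pyGetD (PySem.List.pyGetD costs i []) j 0 < b2.1 then
          (PySem.List.pyGetD (PySem.List.pyGetD costs i []) j 0, i, j)
        else b2) b) ((10 : Int) ^ 9, -1, -1)
  if best.2.1 = -1 then (st.1, st.2.1, true)
  else (PySem.List.pySetD st.1 best.2.1 best.2.2, PySem.Set.add st.2.1 best.2.2, st.2.2)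

def pvGreedy (args : List String) (params : List String) : List Int :=
  let k : Int := min (PySem.List.len args) (PySem.List.len params)
  ((PySem.List.pyRange 0 k 1).foldl
    (fun st _ => pvStepA (pvCosts args params) k (PySem.List.len params) st)
    (PySem.List.pyRepeat [(-1 : Int)] k, (PySem.Set.empty : PySem.Set Int), false)).1

def optimal_cost_py (args : List String) (params : List String) : Int × List Int :=
  let assignment := pvGreedy args params
  let k : Int := min (PySem.List.len args) (PySem.List.len params)
  let cost := (PySem.List.pyRange 0 k 1).foldl (fun acc i =>
      if PySem.List.pyGetD assignment i 0 ≠ -1 then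
        acc + pvEditDistance (PySem.List.pyGetD args i "")
                (PySem.List.pyGetD params (PySem.List.pyGetD assignment i 0) "")
      else acc) 0
  (cost, assignment)

-- ===== PORT B =====
-- B's loop body: take the edge (c, i*P+j) if arg i and param j are both free
def pvStep (P : Int) (st : List Int × List Int × Int) (e : Int × Int) :
    List Int × List Int × Int :=
  if PySem.List.pyGetD st.1 (PySem.Int.floordiv e.2 P) 0 = -1 ∧
     PySem.Set.contains st.2.1 (PySem.Int.mod e.2 P) = false then
    (PySem.List.pySetD st.1 (PySem.Int.floordiv e.2 P) (PySem.Int.mod e.2 P),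
     PySem.Set.add st.2.1 (PySem.Int.mod e.2 P),
     st.2.2 + e.1)
  else st

def optimal_cost_py_alt (args : List String) (params : List String) : Int × List Int :=
  let k : Int := min (PySem.List.len args) (PySem.List.len params)
  let P : Int := PySem.List.len params
  let edges := PySem.List.sorted2
    ((PySem.List.pyRange 0 k 1).flatMap (fun i =>
      (PySem.List.pyRange 0 P 1).map (fun j =>
        (pvEditDistance (PySem.List.pyGetD args i "") (PySem.List.pyGetD params j ""),
         i * P + j))))
    (fun e => e.1) (fun e => e.2)
  let st := edges.foldl (pvStep P)
    (PySem.List.pyRepeat [(-1 : Int)] k, (PySem.Set.empty : PySem.Set Int), (0 : Int))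
  (st.2.2, st.1)

-- ===== PRECONDITION & SPEC =====
-- Pre_ excludes only inputs holding an arg/param pair of combined length ≥ 10^9: there an
-- edit distance can reach A's 10**9 sentinel, so A may stop matching early (on real
-- hardware A cannot return on such inputs: its DP rows alone exhaust memory).
def Pre_optimal_cost_py (args : List String) (params : List String) : Prop :=
  ∀ a ∈ args, ∀ p ∈ params, a.toList.length + p.toList.length < 1000000000
instance (args : List String) (params : List String) : Decidable (Pre_optimal_cost_py args params) := by unfold Pre_optimal_cost_py; infer_instance
def pvWitness_optimal_cost_py : List String × List String := (["add", "sub"], ["sum", "db"])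

def Spec_optimal_cost_py (args : List String) (params : List String) (out : Int × List Int) : Prop := out = optimal_cost_py_alt args params
instance (args : List String) (params : List String) (out : Int × List Int) : Decidable (Spec_optimal_cost_py args params out) := by unfold Spec_optimal_cost_py; infer_instance

-- ===== CLAIM (what is proved, stated in full; the proofs are below) =====
def Claim_equal_optimal_cost_py : Prop := ∀ (args : List String) (params : List String), Dom_optimal_cost_py args params → Pre_optimal_cost_py args params → Spec_optimal_cost_py args params (optimal_cost_py args params)

-- ===== LEMMAS AND PROOFS =====

-- ---------- edit-distance upper bound ----------
lemma pvEdRowGo_bound (ai : Char) (B : Int) :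
    ∀ (bs : List Char) (ps : List Int) (pj1 left : Int), (∀ x ∈ ps, x ≤ B) →
      ∀ x ∈ pvEdRowGo ai bs ps pj1 left, x ≤ B + 1 := by
  intro bs
  induction bs with
  | nil => intro ps pj1 left _ x hx; simp [pvEdRowGo] at hx
  | cons bj bs ih =>
    intro ps pj1 left hps x hx
    cases ps with
    | nil => simp [pvEdRowGo] at hx
    | cons pj ps =>
      simp only [pvEdRowGo, List.mem_cons] at hx
      rcases hx with rfl | hx
      · have := hps pj (by simp)
        simp only [min_le_iff]
        left; omega
      · exact ih ps pj _ (fun y hy => hps y (by simp [hy])) x hx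

lemma pvEdLoop_bound (bs : List Char) :
    ∀ (as' : List Char) (i : Int) (prev : List Int) (B : Int),
      (∀ x ∈ prev, x ≤ B) → i ≤ B + 1 →
      ∀ x ∈ pvEdLoop bs as' i prev, x ≤ B + as'.length := by
  intro as'
  induction as' with
  | nil => intro i prev B hp _ x hx; simpa [pvEdLoop] using hp x hx
  | cons ai arest ih =>
    intro i prev B hp hi x hx
    simp only [pvEdLoop] at hx
    have hstep : ∀ y ∈ (i :: pvEdRowGo ai bs prev.tail (prev.headD 0) i), y ≤ B + 1 := by
      intro y hy
      rcases List.mem_cons.mp hy with rfl | hy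
      · exact hi
      · exact pvEdRowGo_bound ai B bs prev.tail _ _
          (fun z hz => hp z (List.mem_of_mem_tail hz)) y hy
    have := ih (i + 1) _ (B + 1) hstep (by omega) x hx
    simp only [List.length_cons]
    push_cast
    omega

lemma pvEditDistance_le (a b : String) :
    pvEditDistance a b ≤ (a.toList.length : Int) + (b.toList.length : Int) := by
  unfold pvEditDistance
  show PySem.List.pyGetD (pvEdLoop b.toList a.toList 1 (PySem.List.pyRange 0 (PySem.Str.len b + 1) 1)) (PySem.Str.len b) 0 ≤ _
  have hlen : PySem.Str.len b = (b.toList.length : Int) := PySem.Str.len_eq b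
  have hp : ∀ x ∈ PySem.List.pyRange 0 (PySem.Str.len b + 1) 1, x ≤ (b.toList.length : Int) := by
    intro x hx
    rw [PySem.List.mem_pyRange_one] at hx
    omega
  have hall := pvEdLoop_bound b.toList a.toList 1 _ (b.toList.length : Int) hp (by omega)
  rcases h : PySem.List.pyGet? (pvEdLoop b.toList a.toList 1 (PySem.List.pyRange 0 (PySem.Str.len b + 1) 1)) (PySem.Str.len b) with _ | x
  · rw [PySem.List.pyGetD_of_none _ _ _ h]
    positivity
  · have hx := PySem.List.mem_of_pyGet?_eq_some _ h
    have := hall x hx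
    have hd : PySem.List.pyGetD (pvEdLoop b.toList a.toList 1 (PySem.List.pyRange 0 (PySem.Str.len b + 1) 1)) (PySem.Str.len b) 0 = x := by
      simp only [PySem.List.pyGetD, h, Option.getD_some]
    rw [hd]
    omega

-- ---------- the lexicographic order on edges ----------
def pvLexLe (a b : Int × Int) : Prop := a.1 < b.1 ∨ (a.1 = b.1 ∧ a.2 ≤ b.2)

lemma pvLexLe_refl (a : Int × Int) : pvLexLe a a := by
  simp [pvLexLe]

lemma pvLexLe_trans {a b c : Int × Int} (h1 : pvLexLe a b) (h2 : pvLexLe b c) : pvLexLe a c := by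
  rcases h1 with h1 | ⟨h1, h1'⟩ <;> rcases h2 with h2 | ⟨h2, h2'⟩ <;>
    simp [pvLexLe] <;> omega

lemma pvLexLe_antisymm {a b : Int × Int} (h1 : pvLexLe a b) (h2 : pvLexLe b a) : a = b := by
  rcases a with ⟨a1, a2⟩; rcases b with ⟨b1, b2⟩
  rcases h1 with h1 | ⟨h1, h1'⟩ <;> rcases h2 with h2 | ⟨h2, h2'⟩ <;>
    simp_all <;> omega

def pvBefore (a b : Int × Int) : Bool :=
  decide (a.1 < b.1) || (!decide (b.1 < a.1) && decide (a.2 < b.2))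

lemma pvBefore_true_le {a b : Int × Int} (h : pvBefore a b = true) : pvLexLe a b := by
  simp [pvBefore] at h; rcases a with ⟨a1, a2⟩; rcases b with ⟨b1, b2⟩
  simp [pvLexLe]; omega

lemma pvBefore_false_le {a b : Int × Int} (h : pvBefore a b = false) : pvLexLe b a := by
  simp [pvBefore] at h; rcases a with ⟨a1, a2⟩; rcases b with ⟨b1, b2⟩
  simp [pvLexLe]; omega


lemma pvInsertBy_pairwise (x : Int × Int) :
    ∀ (ys : List (Int × Int)), ys.Pairwise pvLexLe →
      (PySem.List.insertBy pvBefore x ys).Pairwise pvLexLe := by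
  intro ys
  induction ys with
  | nil => intro _; simp [PySem.List.insertBy]
  | cons y ys ih =>
    intro h
    rw [List.pairwise_cons] at h
    by_cases hb : pvBefore x y = true
    · simp only [PySem.List.insertBy, hb, if_true]
      refine List.Pairwise.cons ?_ (List.Pairwise.cons h.1 h.2)
      intro z hz
      rcases List.mem_cons.mp hz with rfl | hz
      · exact pvBefore_true_le hb
      · exact pvLexLe_trans (pvBefore_true_le hb) (h.1 z hz)
    · simp only [PySem.List.insertBy, hb]
      refine List.Pairwise.cons ?_ (ih h.2)
      intro z hz
      rcases (PySem.List.insertBy_mem_iff _ _ _ _).mp hz with rfl | hz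
      · exact pvBefore_false_le (by simpa using hb)
      · exact h.1 z hz


lemma pvSorted_pairwise (L : List (Int × Int)) :
    (PySem.List.sorted2 L (fun e => e.1) (fun e => e.2) false).Pairwise pvLexLe := by
  have heq : PySem.List.sorted2 L (fun e => e.1) (fun e => e.2) false =
      L.foldl (fun acc x => PySem.List.insertBy pvBefore x acc) [] := rfl
  rw [heq]
  have aux : ∀ (M : List (Int × Int)) (acc : List (Int × Int)), acc.Pairwise pvLexLe →
      (M.foldl (fun acc x => PySem.List.insertBy pvBefore x acc) acc).Pairwise pvLexLe := by
    intro M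
    induction M with
    | nil => intro acc h; simpa using h
    | cons m M ih => intro acc h; exact ih _ (pvInsertBy_pairwise m acc h)
  exact aux L [] (by simp)

-- ---------- find? on the sorted edge list ----------

lemma pvFind_some {L : List (Int × Int)} {p : Int × Int → Bool} {e : Int × Int}
    (hpair : L.Pairwise pvLexLe) (h : L.find? p = some e) :
    e ∈ L ∧ p e = true ∧ ∀ e' ∈ L, p e' = true → pvLexLe e e' := by
  induction L with
  | nil => simp at h
  | cons a T ih =>
    rw [List.pairwise_cons] at hpair
    by_cases ha : p a = true
    · rw [List.find?_cons_of_pos ha] at h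
      obtain rfl := Option.some_injective _ h
      refine ⟨by simp, ha, ?_⟩
      intro e' he' _
      rcases List.mem_cons.mp he' with rfl | he'
      · exact pvLexLe_refl e'
      · exact hpair.1 e' he'
    · rw [List.find?_cons_of_neg ha] at h
      obtain ⟨hmem, hpe, hbest⟩ := ih hpair.2 h
      refine ⟨by simp [hmem], hpe, ?_⟩
      intro e' he' hpe'
      rcases List.mem_cons.mp he' with rfl | he'
      · exact absurd hpe' ha
      · exact hbest e' he' hpe'

-- ---------- the compatibility test and B's scan step ----------
def pvCompat (P : Int) (asg used : List Int) (e : Int × Int) : Bool :=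
  decide (PySem.List.pyGetD asg (PySem.Int.floordiv e.2 P) 0 = -1) &&
    !(PySem.Set.contains used (PySem.Int.mod e.2 P))

lemma pvStep_of_compat {P : Int} {st : List Int × List Int × Int} {e : Int × Int}
    (h : pvCompat P st.1 st.2.1 e = true) :
    pvStep P st e =
      (PySem.List.pySetD st.1 (PySem.Int.floordiv e.2 P) (PySem.Int.mod e.2 P),
       PySem.Set.add st.2.1 (PySem.Int.mod e.2 P), st.2.2 + e.1) := by
  simp [pvCompat] at h
  simp [pvStep, h.1, h.2]

lemma pvStep_of_not_compat {P : Int} {st : List Int × List Int × Int} {e : Int × Int}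
    (h : pvCompat P st.1 st.2.1 e = false) : pvStep P st e = st := by
  simp [pvCompat] at h
  by_cases h1 : PySem.List.pyGetD st.1 (PySem.Int.floordiv e.2 P) 0 = -1
  · simp [pvStep, h1, h h1]
  · simp [pvStep, h1]

-- ---------- repeated extraction of the best free edge ----------
def pvRep (P : Int) (L : List (Int × Int)) : Nat → List Int × List Int × Int → List Int × List Int × Int
  | 0, st => st
  | n + 1, st =>
    match L.find? (pvCompat P st.1 st.2.1) with
    | none => st
    | some e => pvRep P L n (pvStep P st e)

-- good edges: both decoded endpoints are nonnegative
def pvEdgeOK (P : Int) (e : Int × Int) : Prop :=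
  0 ≤ PySem.Int.floordiv e.2 P ∧ 0 ≤ PySem.Int.mod e.2 P

-- reading/writing the assignment list at nonnegative indices
lemma pvGetD_set {asg : List Int} {m n : Int} (hm : 0 ≤ m) (hn : 0 ≤ n) (v : Int) :
    PySem.List.pyGetD (PySem.List.pySetD asg m v) n 0 =
      if n = m ∧ m.toNat < asg.length then v else PySem.List.pyGetD asg n 0 := by
  rw [PySem.List.pySetD_of_nonneg _ _ hm, PySem.List.pyGetD_of_nonneg _ _ hn,
      PySem.List.pyGetD_of_nonneg _ _ hn]
  rw [List.getD_eq_getElem?_getD, List.getD_eq_getElem?_getD, List.getElem?_set]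
  by_cases h : m.toNat = n.toNat
  · rw [if_pos h]
    by_cases hlen : m.toNat < asg.length
    · rw [if_pos hlen, if_pos ⟨by omega, hlen⟩]; rfl
    · rw [if_neg hlen, if_neg (by intro ⟨_, h2⟩; exact hlen h2)]
      rw [List.getElem?_eq_none (by omega)]
  · rw [if_neg h, if_neg (by intro ⟨h1, _⟩; subst h1; exact h rfl)]

lemma pvContains_iff {used : List Int} {x : Int} :
    PySem.Set.contains used x = true ↔ x ∈ used := by
  simp [PySem.Set.contains]

lemma pvContains_add {used : List Int} {x y : Int} (h : PySem.Set.contains used x = true) :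
    PySem.Set.contains (PySem.Set.add used y) x = true := by
  rw [pvContains_iff] at h ⊢
  exact (PySem.Set.mem_add used y x).mpr (Or.inl h)

-- an incompatible edge stays incompatible as the state grows

lemma pvCompat_mono {P : Int} {st : List Int × List Int × Int} {e e' : Int × Int}
    (hoke : pvEdgeOK P e) (hok : pvEdgeOK P e') (h : pvCompat P st.1 st.2.1 e = false) :
    pvCompat P (pvStep P st e').1 (pvStep P st e').2.1 e = false := by
  by_cases hc : pvCompat P st.1 st.2.1 e' = true
  · rw [pvStep_of_compat hc]
    simp only [pvCompat, Bool.and_eq_false_iff] at h ⊢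
    rcases h with h | h
    · left
      simp only [decide_eq_false_iff_not] at h ⊢
      rw [pvGetD_set hok.1 hoke.1]
      split_ifs with hif
      · have := hok.2; omega
      · exact h
    · right
      simp only [Bool.not_eq_false'] at h ⊢
      exact pvContains_add h
  · rw [pvStep_of_not_compat (by simpa using hc)]
    exact h


lemma pvRep_drop {P : Int} {e : Int × Int} :
    ∀ (n : Nat) (L : List (Int × Int)) (st : List Int × List Int × Int),
      pvEdgeOK P e → (∀ f ∈ L, pvEdgeOK P f) → pvCompat P st.1 st.2.1 e = false →
      pvRep P (e :: L) n st = pvRep P L n st := by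
  intro n
  induction n with
  | zero => intro L st _ _ _; rfl
  | succ n ih =>
    intro L st hoke hok h
    have hne : ¬ (pvCompat P st.1 st.2.1 e = true) := by simp [h]
    simp only [pvRep, List.find?_cons_of_neg hne]
    rcases hfind : L.find? (pvCompat P st.1 st.2.1) with _ | e'
    · rfl
    · have hmem := List.mem_of_find?_eq_some hfind
      exact ih L _ hoke hok (pvCompat_mono hoke (hok e' hmem) h)

def pvFree (asg : List Int) : Nat := asg.countP (fun x => x == -1)


lemma pvFree_pos {P : Int} {asg used : List Int} {e : Int × Int}
    (hok : pvEdgeOK P e) (h : pvCompat P asg used e = true) : 1 ≤ pvFree asg := by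
  simp only [pvCompat, Bool.and_eq_true, decide_eq_true_eq] at h
  have h1 := h.1
  rw [PySem.List.pyGetD_of_nonneg _ _ hok.1, List.getD_eq_getElem?_getD] at h1
  rcases hx : asg[(PySem.Int.floordiv e.2 P).toNat]? with _ | x
  · rw [hx] at h1; simp at h1
  · rw [hx] at h1
    simp only [Option.getD_some] at h1
    subst h1
    have hmem := List.mem_of_getElem? hx
    have : 0 < asg.countP (fun x => x == -1) :=
      List.countP_pos_iff.mpr ⟨_, hmem, by simp⟩
    unfold pvFree
    omega


lemma pvCountP_set : ∀ (l : List Int) (m : Nat) (v : Int), l[m]? = some (-1) → v ≠ -1 →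
    (l.set m v).countP (fun x => x == -1) + 1 = l.countP (fun x => x == -1) := by
  intro l
  induction l with
  | nil => intro m v h _; simp at h
  | cons a l ih =>
    intro m v h hv
    cases m with
    | zero =>
      simp only [List.getElem?_cons_zero, Option.some_inj] at h
      subst h
      simp [List.set, hv]
    | succ m =>
      simp only [List.getElem?_cons_succ] at h
      simp only [List.set, List.countP_cons]
      have := ih m v h hv
      omega

lemma pvFree_step {P : Int} {st : List Int × List Int × Int} {e : Int × Int}
    (hok : pvEdgeOK P e) (h : pvCompat P st.1 st.2.1 e = true) :
    pvFree (pvStep P st e).1 + 1 = pvFree st.1 := by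
  rw [pvStep_of_compat h]
  simp only [pvCompat, Bool.and_eq_true, decide_eq_true_eq] at h
  have h1 := h.1
  rw [PySem.List.pyGetD_of_nonneg _ _ hok.1, List.getD_eq_getElem?_getD] at h1
  rcases hx : st.1[(PySem.Int.floordiv e.2 P).toNat]? with _ | x
  · rw [hx] at h1; simp at h1
  · rw [hx] at h1
    simp only [Option.getD_some] at h1
    subst h1
    simp only [pvFree, PySem.List.pySetD_of_nonneg _ _ hok.1]
    exact pvCountP_set _ _ _ hx (by have := hok.2; omega)

-- MAIN LEMMA 1: the one-pass greedy scan equals repeated best-edge extraction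

lemma pvScanRep {P : Int} :
    ∀ (L : List (Int × Int)) (st : List Int × List Int × Int) (n : Nat),
      (∀ f ∈ L, pvEdgeOK P f) → pvFree st.1 ≤ n →
      L.foldl (pvStep P) st = pvRep P L n st := by
  intro L
  induction L with
  | nil =>
    intro st n _ _
    cases n <;> rfl
  | cons e T ih =>
    intro st n hok hn
    have hoke : pvEdgeOK P e := hok e (by simp)
    have hokT : ∀ f ∈ T, pvEdgeOK P f := fun f hf => hok f (by simp [hf])
    by_cases hc : pvCompat P st.1 st.2.1 e = true
    · have hpos := pvFree_pos hoke hc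
      rcases n with _ | m
      · omega
      · simp only [List.foldl_cons, pvRep, List.find?_cons_of_pos hc]
        rw [pvRep_drop m T _ hoke hokT ?_]
        · refine ih _ m hokT ?_
          have := pvFree_step hoke hc
          omega
        · -- e just got taken: its arg slot is no longer -1
          have h' := hc
          simp only [pvCompat, Bool.and_eq_true, decide_eq_true_eq] at h'
          rw [pvStep_of_compat hc]
          simp only [pvCompat, Bool.and_eq_false_iff]
          left
          simp only [decide_eq_false_iff_not]
          rw [pvGetD_set hoke.1 hoke.1]
          have h1 := h'.1
          rw [PySem.List.pyGetD_of_nonneg _ _ hoke.1, List.getD_eq_getElem?_getD] at h1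
          rcases hx : st.1[(PySem.Int.floordiv e.2 P).toNat]? with _ | x
          · rw [hx] at h1; simp at h1
          · have hlen : (PySem.Int.floordiv e.2 P).toNat < st.1.length :=
              (List.getElem?_eq_some_iff.mp hx).1
            have hcond : PySem.Int.floordiv e.2 P = PySem.Int.floordiv e.2 P ∧
                (PySem.Int.floordiv e.2 P).toNat < st.1.length := ⟨rfl, hlen⟩
            rw [if_pos hcond]
            have := hoke.2
            omega
    · have hc' : pvCompat P st.1 st.2.1 e = false := by simpa using hc
      simp only [List.foldl_cons, pvStep_of_not_compat hc']
      rw [pvRep_drop n T st hoke hokT hc']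
      exact ih st n hokT hn


-- ---------- decoding n = i*P + j ----------
lemma pvDecode (lp i j : Nat) (hj : j < lp) :
    PySem.Int.floordiv ((i : Int) * lp + j) lp = i ∧
    PySem.Int.mod ((i : Int) * lp + j) lp = j := by
  have hlp : (0 : Int) < lp := by exact_mod_cast Nat.pos_of_ne_zero (by omega)
  have hj0 : (0 : Int) ≤ (j : Int) := by positivity
  have hjlt : (j : Int) < (lp : Int) := by exact_mod_cast hj
  constructor
  · rw [PySem.Int.floordiv_eq_ediv_of_pos hlp, add_comm,
        Int.add_mul_ediv_right _ _ (ne_of_gt hlp), Int.ediv_eq_zero_of_lt hj0 hjlt]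
    simp
  · rw [PySem.Int.mod_eq_emod_of_pos hlp, add_comm, mul_comm,
        Int.add_mul_emod_self_left, Int.emod_eq_of_lt hj0 hjlt]

-- ---------- A's inner argmin fold ----------
def pvBestStep (P : Int) (asg used : List Int) (b : Int × Int × Int) (e : Int × Int) :
    Int × Int × Int :=
  if pvCompat P asg used e = true ∧ e.1 < b.1 then
    (e.1, PySem.Int.floordiv e.2 P, PySem.Int.mod e.2 P)
  else b

-- what the strict-min fold computes: either nothing beat the accumulator, or the
-- lexicographically least compatible edge below it won (first occurrence = least index)
lemma pvBestQ (P : Int) (asg used : List Int) :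
    ∀ (L : List (Int × Int)) (b : Int × Int × Int),
      L.Pairwise (fun x y => x.2 < y.2) →
      (L.foldl (pvBestStep P asg used) b = b ∧
        ∀ e ∈ L, pvCompat P asg used e = true → b.1 ≤ e.1) ∨
      (∃ e ∈ L, pvCompat P asg used e = true ∧
        L.foldl (pvBestStep P asg used) b =
          (e.1, PySem.Int.floordiv e.2 P, PySem.Int.mod e.2 P) ∧
        e.1 < b.1 ∧ ∀ e' ∈ L, pvCompat P asg used e' = true → pvLexLe e e') := by
  intro L
  induction L with
  | nil => intro b _; left; simp
  | cons e T ih =>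
    intro b hpair
    rw [List.pairwise_cons] at hpair
    by_cases hc : pvCompat P asg used e = true ∧ e.1 < b.1
    · have hstep : pvBestStep P asg used b e =
          (e.1, PySem.Int.floordiv e.2 P, PySem.Int.mod e.2 P) := by
        simp [pvBestStep, hc]
      rcases ih (e.1, PySem.Int.floordiv e.2 P, PySem.Int.mod e.2 P) hpair.2 with ⟨heq, hge⟩ | ⟨e', he', hce', heq, hlt, hbest⟩
      · right
        refine ⟨e, by simp, hc.1, ?_, hc.2, ?_⟩
        · simp only [List.foldl_cons, hstep, heq]
        · intro f hf hcf
          rcases List.mem_cons.mp hf with rfl | hf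
          · exact pvLexLe_refl f
          · have := hge f hf hcf
            rcases lt_or_eq_of_le this with h | h
            · exact Or.inl h
            · exact Or.inr ⟨h, le_of_lt (hpair.1 f hf)⟩
      · right
        refine ⟨e', by simp [he'], hce', ?_, ?_, ?_⟩
        · simp only [List.foldl_cons, hstep, heq]
        · calc e'.1 < e.1 := hlt
            _ < b.1 := hc.2
        · intro f hf hcf
          rcases List.mem_cons.mp hf with rfl | hf
          · exact Or.inl hlt
          · exact hbest f hf hcf
    · have hstep : pvBestStep P asg used b e = b := by simp [pvBestStep, hc]
      rcases ih b hpair.2 with ⟨heq, hge⟩ | ⟨e', he', hce', heq, hlt, hbest⟩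
      · left
        refine ⟨by simp only [List.foldl_cons, hstep, heq], ?_⟩
        intro f hf hcf
        rcases List.mem_cons.mp hf with rfl | hf
        · rcases Decidable.not_and_iff_or_not.mp hc with h | h
          · exact absurd hcf h
          · omega
        · exact hge f hf hcf
      · right
        refine ⟨e', by simp [he'], hce', ?_, hlt, ?_⟩
        · simp only [List.foldl_cons, hstep, heq]
        · intro f hf hcf
          rcases List.mem_cons.mp hf with rfl | hf
          · rcases Decidable.not_and_iff_or_not.mp hc with h | h
            · exact absurd hcf h
            · left; omega
          · exact hbest f hf hcf

-- the argmin fold over the raw edge list = find? on the sorted edge list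
lemma pvBest_eq (P : Int) (asg used : List Int) (L : List (Int × Int))
    (hpair : L.Pairwise (fun x y => x.2 < y.2))
    (hcb : ∀ e ∈ L, e.1 < 10 ^ 9) :
    L.foldl (pvBestStep P asg used) (10 ^ 9, -1, -1) =
      match (PySem.List.sorted2 L (fun e => e.1) (fun e => e.2) false).find?
          (pvCompat P asg used) with
      | none => ((10 : Int) ^ 9, -1, -1)
      | some e => (e.1, PySem.Int.floordiv e.2 P, PySem.Int.mod e.2 P) := by
  have hperm := PySem.List.sorted2_perm L (fun e => e.1) (fun e => e.2) false
  rcases hfind : (PySem.List.sorted2 L (fun e => e.1) (fun e => e.2) false).find?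
      (pvCompat P asg used) with _ | e0
  · rw [List.find?_eq_none] at hfind
    rcases pvBestQ P asg used L (10 ^ 9, -1, -1) hpair with ⟨heq, _⟩ | ⟨e, he, hce, _, _, _⟩
    · exact heq
    · exact absurd hce (hfind e (hperm.mem_iff.mpr he))
  · obtain ⟨hmem0, hc0, hbest0⟩ := pvFind_some (pvSorted_pairwise L) hfind
    have hmem0' : e0 ∈ L := hperm.mem_iff.mp hmem0
    rcases pvBestQ P asg used L (10 ^ 9, -1, -1) hpair with ⟨_, hge⟩ | ⟨e, he, hce, heq, _, hbest⟩
    · have := hge e0 hmem0' hc0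
      have := hcb e0 hmem0'
      omega
    · have h1 : pvLexLe e e0 := hbest e0 hmem0' hc0
      have h2 : pvLexLe e0 e := hbest0 e (hperm.mem_iff.mpr he) hce
      rw [heq, pvLexLe_antisymm h1 h2]


-- ---------- the instantiated edge list ----------
def pvKN (args params : List String) : Nat := min args.length params.length

def pvCostF (args params : List String) (i j : Nat) : Int :=
  pvEditDistance (args.getD i "") (params.getD j "")

def pvEdge (args params : List String) (i j : Nat) : Int × Int :=
  (pvCostF args params i j, (i : Int) * params.length + j)

def pvG (args params : List String) : List (Int × Int) :=
  (List.range (pvKN args params)).flatMap (fun i =>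
    (List.range params.length).map (pvEdge args params i))

def pvSL (args params : List String) : List (Int × Int) :=
  PySem.List.sorted2 (pvG args params) (fun e => e.1) (fun e => e.2) false

def pvOKS (args params : List String) (e : Int × Int) : Prop :=
  ∃ i j : Nat, i < pvKN args params ∧ j < params.length ∧ e = pvEdge args params i j

lemma pvG_shape (args params : List String) : ∀ e ∈ pvG args params, pvOKS args params e := by
  intro e he
  rw [pvG, List.mem_flatMap] at he
  obtain ⟨i, hi, he⟩ := he
  rw [List.mem_map] at he
  obtain ⟨j, hj, rfl⟩ := he
  exact ⟨i, j, List.mem_range.mp hi, List.mem_range.mp hj, rfl⟩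

lemma pvSL_shape (args params : List String) : ∀ e ∈ pvSL args params, pvOKS args params e := by
  intro e he
  exact pvG_shape args params e
    ((PySem.List.sorted2_perm (pvG args params) _ _ false).mem_iff.mp he)

lemma pvOKS_ok (args params : List String) {e : Int × Int} (h : pvOKS args params e) :
    pvEdgeOK (params.length : Int) e := by
  obtain ⟨i, j, _, hj, rfl⟩ := h
  obtain ⟨hd, hm⟩ := pvDecode params.length i j hj
  constructor
  · rw [pvEdge] at *
    simp only [hd]
    positivity
  · rw [pvEdge] at *
    simp only [hm]
    positivity

lemma pvG_snd_lt (args params : List String) :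
    (pvG args params).Pairwise (fun x y => x.2 < y.2) := by
  rw [pvG]
  have hblock : ∀ i : Nat, ((List.range params.length).map (pvEdge args params i)).Pairwise
      (fun x y => x.2 < y.2) := by
    intro i
    rw [List.pairwise_map]
    refine List.Pairwise.imp ?_ (List.pairwise_lt_range)
    intro j j' hjj'
    simp only [pvEdge]
    have : (j : Int) < (j' : Int) := by exact_mod_cast hjj'
    omega
  have hcross : ∀ (k : Nat) (e : Int × Int), e ∈ (List.range k).flatMap (fun i =>
      (List.range params.length).map (pvEdge args params i)) →
      e.2 < (k : Int) * params.length := by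
    intro k e he
    rw [List.mem_flatMap] at he
    obtain ⟨i, hi, he⟩ := he
    rw [List.mem_map] at he
    obtain ⟨j, hj, rfl⟩ := he
    rw [List.mem_range] at hi hj
    simp only [pvEdge]
    have h1 : (i : Int) * params.length + j < ((i + 1 : Nat) : Int) * params.length := by
      push_cast
      have hexp : ((i : Int) + 1) * (params.length : Int) =
          (i : Int) * params.length + params.length := by ring
      rw [hexp]
      have : (j : Int) < (params.length : Int) := by exact_mod_cast hj
      omega
    have h2 : ((i + 1 : Nat) : Int) * (params.length : Int) ≤ (k : Int) * params.length := by
      have : ((i + 1 : Nat) : Int) ≤ (k : Int) := by exact_mod_cast hi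
      exact mul_le_mul_of_nonneg_right this (by positivity)
    omega
  induction (pvKN args params) with
  | zero => simp
  | succ k ih =>
    rw [List.range_succ, List.flatMap_append]
    rw [List.pairwise_append]
    refine ⟨ih, by simpa using hblock k, ?_⟩
    intro x hx y hy
    have h1 := hcross k x hx
    simp only [List.flatMap_cons, List.flatMap_nil, List.append_nil] at hy
    rw [List.mem_map] at hy
    obtain ⟨j, hj, rfl⟩ := hy
    simp only [pvEdge]
    have : (0 : Int) ≤ (j : Int) := by positivity
    omega

lemma pvG_cost_lt (args params : List String) (hpre : Pre_optimal_cost_py args params) :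
    ∀ e ∈ pvG args params, e.1 < 10 ^ 9 := by
  intro e he
  obtain ⟨i, j, hi, hj, rfl⟩ := pvG_shape args params e he
  simp only [pvEdge, pvCostF]
  have hik : i < args.length := lt_of_lt_of_le hi (by rw [pvKN]; omega)
  have ha : args.getD i "" = args[i]'hik := List.getD_eq_getElem args "" hik
  have hb : params.getD j "" = params[j]'hj := List.getD_eq_getElem params "" hj
  have hmem_a : args[i]'hik ∈ args := List.getElem_mem hik
  have hmem_b : params[j]'hj ∈ params := List.getElem_mem hj
  have hlen := hpre _ hmem_a _ hmem_b
  have hle := pvEditDistance_le (args.getD i "") (params.getD j "")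
  rw [ha, hb] at hle ⊢
  have : ((args[i]'hik).toList.length : Int) + ((params[j]'hj).toList.length : Int) <
      1000000000 := by exact_mod_cast hlen
  calc pvEditDistance (args[i]'hik) (params[j]'hj)
      ≤ _ := hle
    _ < 1000000000 := this
    _ = 10 ^ 9 := by norm_num


-- ---------- bridging A's nested argmin loops to the flat edge-list fold ----------
lemma pvLen_min (args params : List String) :
    min (PySem.List.len args) (PySem.List.len params) = ((pvKN args params : Nat) : Int) := by
  simp [PySem.List.len_eq, pvKN, Nat.cast_min]

lemma pvCosts_eq (args params : List String) :
    pvCosts args params = (PySem.List.pyRange 0 ((pvKN args params : Nat) : Int) 1).map (fun i =>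
      (PySem.List.pyRange 0 ((params.length : Nat) : Int) 1).map (fun j =>
        pvEditDistance (PySem.List.pyGetD args i "") (PySem.List.pyGetD params j ""))) := by
  rw [pvCosts, pvLen_min]
  simp [PySem.List.len_eq]

lemma pvBestBridge (args params : List String) (a u : List Int) :
    (PySem.List.pyRange 0 (min (PySem.List.len args) (PySem.List.len params)) 1).foldl
      (fun b i =>
        if PySem.List.pyGetD a i 0 ≠ -1 then b
        else (PySem.List.pyRange 0 (PySem.List.len params) 1).foldl (fun b2 j =>
          if PySem.Set.contains u j then b2
          else if PySem.List.pyGetD (PySem.List.pyGetD (pvCosts args params) i []) j 0 < b2.1 then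
            (PySem.List.pyGetD (PySem.List.pyGetD (pvCosts args params) i []) j 0, i, j)
          else b2) b) ((10 : Int) ^ 9, -1, -1)
    = (pvG args params).foldl (pvBestStep (params.length : Int) a u) ((10 : Int) ^ 9, -1, -1) := by
  rw [pvLen_min, pvG, List.foldl_flatMap]
  have hplen : PySem.List.len params = ((params.length : Nat) : Int) := PySem.List.len_eq params
  rw [hplen, PySem.List.pyRange_zero_nat, PySem.List.pyRange_zero_nat]
  simp only [List.foldl_map]
  apply PySem.List.foldl_congr_mem
  intro b i hi
  have hiK : i < pvKN args params := List.mem_range.mp hi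
  have hrow : PySem.List.pyGetD (pvCosts args params) ((i : Nat) : Int) [] =
      (PySem.List.pyRange 0 ((params.length : Nat) : Int) 1).map (fun j =>
        pvEditDistance (PySem.List.pyGetD args ((i : Nat) : Int) "") (PySem.List.pyGetD params j "")) := by
    rw [pvCosts_eq]
    exact PySem.List.pyGetD_map_pyRange _ _ _ _ hiK
  by_cases hslot : PySem.List.pyGetD a ((i : Nat) : Int) 0 = -1
  · rw [if_neg (by simp [hslot])]
    apply PySem.List.foldl_congr_mem
    intro b2 j hj
    have hjP : j < params.length := List.mem_range.mp hj
    obtain ⟨hfd, hmd⟩ := pvDecode params.length i j hjP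
    have hcell : PySem.List.pyGetD (PySem.List.pyGetD (pvCosts args params) ((i : Nat) : Int) [])
        ((j : Nat) : Int) 0 = pvCostF args params i j := by
      rw [hrow, PySem.List.pyGetD_map_pyRange _ _ _ _ hjP, pvCostF]
      simp
    by_cases hcont : PySem.Set.contains u ((j : Nat) : Int) = true
    · rw [if_pos hcont]
      simp only [pvBestStep, pvEdge, pvCompat, hfd, hmd, hcont]
      simp
    · rw [if_neg hcont]
      rw [hcell]
      simp only [pvBestStep, pvEdge, pvCompat, hfd, hmd, hslot,
        Bool.not_eq_true] at hcont ⊢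
      rw [hcont]
      by_cases hlt : pvCostF args params i j < b2.1
      · rw [if_pos hlt, if_pos (by simp [hlt])]
      · rw [if_neg hlt, if_neg (by simp [hlt])]
  · rw [if_pos (by simpa using hslot)]
    have : ∀ (b2 : Int × Int × Int), ∀ j ∈ List.range params.length,
        pvBestStep (params.length : Int) a u b2 (pvEdge args params i j) = b2 := by
      intro b2 j hj
      have hjP : j < params.length := List.mem_range.mp hj
      obtain ⟨hfd, _⟩ := pvDecode params.length i j hjP
      simp only [pvBestStep, pvEdge, pvCompat, hfd]
      rw [if_neg]
      rintro ⟨hc, -⟩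
      rw [Bool.and_eq_true, decide_eq_true_eq] at hc
      exact hslot hc.1
    rw [PySem.List.foldl_congr_mem _ _ (fun acc _ => acc) _ this, PySem.List.foldl_ignore]


-- ---------- one iteration of A's outer loop, characterized ----------
lemma pvStepA_false (args params : List String) (hpre : Pre_optimal_cost_py args params)
    (a u : List Int) :
    pvStepA (pvCosts args params) (min (PySem.List.len args) (PySem.List.len params))
        (PySem.List.len params) (a, u, false) =
      match (pvSL args params).find? (pvCompat (params.length : Int) a u) with
      | none => (a, u, true)
      | some e => (PySem.List.pySetD a (PySem.Int.floordiv e.2 (params.length : Int))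
                     (PySem.Int.mod e.2 (params.length : Int)),
                   PySem.Set.add u (PySem.Int.mod e.2 (params.length : Int)), false) := by
  simp only [pvStepA, Bool.false_eq_true, if_false]
  rw [pvBestBridge args params a u,
      pvBest_eq (params.length : Int) a u (pvG args params) (pvG_snd_lt args params)
        (pvG_cost_lt args params hpre)]
  rcases hfind : (pvSL args params).find? (pvCompat (params.length : Int) a u) with _ | e
  · rw [show PySem.List.sorted2 (pvG args params) (fun e => e.1) (fun e => e.2) false =
        pvSL args params from rfl, hfind]
    rfl
  · rw [show PySem.List.sorted2 (pvG args params) (fun e => e.1) (fun e => e.2) false =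
        pvSL args params from rfl, hfind]
    have hmem := List.mem_of_find?_eq_some hfind
    obtain ⟨i, j, hiK, hjP, rfl⟩ := pvSL_shape args params e hmem
    obtain ⟨hfd, _⟩ := pvDecode params.length i j hjP
    rw [if_neg (by simp only [pvEdge, hfd]; omega)]

lemma pvStepA_done (C : List (List Int)) (k P : Int) (a u : List Int) :
    pvStepA C k P (a, u, true) = (a, u, true) := by
  simp [pvStepA]

lemma pvIterA_done (C : List (List Int)) (k P : Int) :
    ∀ (n : Nat) (a u : List Int), (pvStepA C k P)^[n] (a, u, true) = (a, u, true) := by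
  intro n
  induction n with
  | zero => intro a u; rfl
  | succ n ih =>
    intro a u
    rw [Function.iterate_succ_apply, pvStepA_done]
    exact ih a u

lemma pvFoldl_iterate {α β : Type} (g : α → α) :
    ∀ (l : List β) (s : α), l.foldl (fun s _ => g s) s = g^[l.length] s := by
  intro l
  induction l with
  | nil => intro s; rfl
  | cons x l ih =>
    intro s
    rw [List.foldl_cons, List.length_cons, Function.iterate_succ_apply]
    exact ih (g s)

lemma pvALoop (args params : List String) (hpre : Pre_optimal_cost_py args params) :
    ∀ (n : Nat) (a u : List Int) (t : Int),
      (((pvStepA (pvCosts args params) (min (PySem.List.len args) (PySem.List.len params))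
          (PySem.List.len params))^[n] (a, u, false)).1,
       ((pvStepA (pvCosts args params) (min (PySem.List.len args) (PySem.List.len params))
          (PySem.List.len params))^[n] (a, u, false)).2.1) =
      ((pvRep (params.length : Int) (pvSL args params) n (a, u, t)).1,
       (pvRep (params.length : Int) (pvSL args params) n (a, u, t)).2.1) := by
  intro n
  induction n with
  | zero => intro a u t; rfl
  | succ n ih =>
    intro a u t
    rw [Function.iterate_succ_apply, pvStepA_false args params hpre a u]
    rcases hfind : (pvSL args params).find? (pvCompat (params.length : Int) a u) with _ | e
    · simp only [pvRep, hfind, pvIterA_done]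
    · have hc : pvCompat (params.length : Int) a u e = true := List.find?_some hfind
      simp only [pvRep, hfind]
      have hstep : pvStep (params.length : Int) (a, u, t) e =
          (PySem.List.pySetD a (PySem.Int.floordiv e.2 (params.length : Int))
             (PySem.Int.mod e.2 (params.length : Int)),
           PySem.Set.add u (PySem.Int.mod e.2 (params.length : Int)), t + e.1) :=
        pvStep_of_compat hc
      rw [hstep]
      exact ih _ _ (t + e.1)

-- ---------- pvRep invariants ----------
lemma pvRep_length {P : Int} {L : List (Int × Int)} :
    ∀ (n : Nat) (st : List Int × List Int × Int),
      (pvRep P L n st).1.length = st.1.length := by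
  intro n
  induction n with
  | zero => intro st; rfl
  | succ n ih =>
    intro st
    simp only [pvRep]
    rcases hfind : L.find? (pvCompat P st.1 st.2.1) with _ | e
    · rfl
    · rw [ih]
      by_cases hc : pvCompat P st.1 st.2.1 e = true
      · rw [pvStep_of_compat hc]
        exact PySem.List.length_pySetD _ _ _
      · rw [pvStep_of_not_compat (by simpa using hc)]

def pvAsgOK (lp : Nat) (asg : List Int) : Prop :=
  ∀ x ∈ asg, x = -1 ∨ ∃ j : Nat, j < lp ∧ x = (j : Int)

lemma pvRep_AsgOK (args params : List String) :
    ∀ (n : Nat) (st : List Int × List Int × Int),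
      (∀ e ∈ pvSL args params, pvOKS args params e) → pvAsgOK params.length st.1 →
      pvAsgOK params.length (pvRep (params.length : Int) (pvSL args params) n st).1 := by
  intro n
  induction n with
  | zero => intro st _ h; exact h
  | succ n ih =>
    intro st hshape h
    simp only [pvRep]
    rcases hfind : (pvSL args params).find? (pvCompat (params.length : Int) st.1 st.2.1)
      with _ | e
    · exact h
    · refine ih _ hshape ?_
      have hc := List.find?_some hfind
      rw [pvStep_of_compat hc]
      obtain ⟨i, j, hiK, hjP, rfl⟩ := hshape e (List.mem_of_find?_eq_some hfind)
      obtain ⟨hfd, hmd⟩ := pvDecode params.length i j hjP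
      simp only [pvEdge, hfd, hmd]
      intro x hx
      rw [PySem.List.pySetD_of_nonneg _ _ (by positivity : (0:Int) ≤ (i:Int))] at hx
      rcases List.mem_or_eq_of_mem_set hx with hx | rfl
      · exact h x hx
      · exact Or.inr ⟨j, hjP, rfl⟩

-- ---------- the total accumulated by B is the cost A recomputes ----------
def pvCostSum (args params : List String) (asg : List Int) : Int :=
  ((List.range (pvKN args params)).map (fun i =>
    if asg.getD i 0 ≠ -1 then pvCostF args params i ((asg.getD i 0).toNat) else 0)).sum

lemma pvSum_upd (f g : Nat → Int) (iN : Nat) :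
    ∀ (n : Nat), iN < n → (∀ i, i ≠ iN → f i = g i) →
      ((List.range n).map g).sum = ((List.range n).map f).sum - f iN + g iN := by
  intro n
  induction n with
  | zero => intro h; omega
  | succ m ih =>
    intro hlt hagree
    rw [List.range_succ, List.map_append, List.map_append, List.sum_append, List.sum_append]
    by_cases hm : iN = m
    · subst hm
      have : (List.range iN).map g = (List.range iN).map f := by
        apply List.map_congr_left
        intro x hx
        exact (hagree x (by have := List.mem_range.mp hx; omega)).symm
      rw [this]
      simp only [List.map_cons, List.map_nil, List.sum_cons, List.sum_nil]
      ring
    · have hlt' : iN < m := by omega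
      rw [ih hlt' hagree]
      have : g m = f m := (hagree m (by omega)).symm
      simp only [List.map_cons, List.map_nil, List.sum_cons, List.sum_nil, this]
      ring

lemma pvCostSum_set (args params : List String) (asg : List Int) (iN j : Nat)
    (hiK : iN < pvKN args params) (hlen : iN < asg.length) (hslot : asg.getD iN 0 = -1) :
    pvCostSum args params (asg.set iN (j : Int)) =
      pvCostSum args params asg + pvCostF args params iN j := by
  unfold pvCostSum
  rw [pvSum_upd (fun i => if asg.getD i 0 ≠ -1 then pvCostF args params i ((asg.getD i 0).toNat) else 0)
      (fun i => if (asg.set iN (j : Int)).getD i 0 ≠ -1 then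
        pvCostF args params i (((asg.set iN (j : Int)).getD i 0).toNat) else 0) iN _ hiK ?_]
  · have h1 : (asg.set iN (j : Int)).getD iN 0 = (j : Int) := by
      rw [List.getD_eq_getElem?_getD, List.getElem?_set, if_pos rfl, if_pos hlen]
      rfl
    rw [h1, hslot]
    rw [if_neg (by simp), if_pos (by omega : ¬((j : Int) = -1)), Int.toNat_natCast]
    ring
  · intro i hi
    have : (asg.set iN (j : Int)).getD i 0 = asg.getD i 0 := by
      rw [List.getD_eq_getElem?_getD, List.getD_eq_getElem?_getD, List.getElem?_set,
        if_neg (by omega)]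
    simp only [this]

lemma pvRep_total (args params : List String) :
    ∀ (n : Nat) (st : List Int × List Int × Int),
      (∀ e ∈ pvSL args params, pvOKS args params e) →
      st.2.2 = pvCostSum args params st.1 →
      (pvRep (params.length : Int) (pvSL args params) n st).2.2 =
        pvCostSum args params (pvRep (params.length : Int) (pvSL args params) n st).1 := by
  intro n
  induction n with
  | zero => intro st _ h; exact h
  | succ n ih =>
    intro st hshape h
    simp only [pvRep]
    rcases hfind : (pvSL args params).find? (pvCompat (params.length : Int) st.1 st.2.1)
      with _ | e
    · exact h
    · refine ih _ hshape ?_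
      have hc := List.find?_some hfind
      obtain ⟨i, j, hiK, hjP, heq⟩ := hshape e (List.mem_of_find?_eq_some hfind)
      rw [pvStep_of_compat hc]
      subst heq
      obtain ⟨hfd, hmd⟩ := pvDecode params.length i j hjP
      simp only [pvEdge, hfd, hmd] at hc ⊢
      rw [PySem.List.pySetD_of_nonneg _ _ (by positivity : (0:Int) ≤ (i:Int)), Int.toNat_natCast]
      -- the slot being overwritten held -1 and is inside the list
      have hslot' := hc
      simp only [pvCompat, hfd, hmd, Bool.and_eq_true, decide_eq_true_eq] at hslot'
      have hslot := hslot'.1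
      rw [PySem.List.pyGetD_of_nonneg _ _ (by positivity : (0:Int) ≤ (i:Int)),
        Int.toNat_natCast] at hslot
      have hlen : i < st.1.length := by
        by_contra hge
        rw [List.getD_eq_getElem?_getD, List.getElem?_eq_none (by omega)] at hslot
        simp at hslot
      rw [pvCostSum_set args params st.1 i j hiK hlen hslot, h, pvCostF]


-- ---------- assembling both ports ----------
def pvSt0 (args params : List String) : List Int × List Int × Int :=
  (List.replicate (pvKN args params) (-1 : Int), PySem.Set.empty, (0 : Int))

lemma pvFree_replicate : ∀ (n : Nat), pvFree (List.replicate n (-1 : Int)) = n := by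
  intro n
  induction n with
  | zero => rfl
  | succ n ih =>
    rw [List.replicate_succ]
    simp only [pvFree, List.countP_cons] at ih ⊢
    rw [ih]
    simp

lemma pvInit_eq (args params : List String) :
    PySem.List.pyRepeat [(-1 : Int)]
        (min (PySem.List.len args) (PySem.List.len params)) =
      List.replicate (pvKN args params) (-1 : Int) := by
  rw [pvLen_min, PySem.List.pyRepeat_singleton, Int.toNat_natCast]

lemma pvEdges_eq (args params : List String) :
    (PySem.List.pyRange 0 (min (PySem.List.len args) (PySem.List.len params)) 1).flatMap
      (fun i => (PySem.List.pyRange 0 (PySem.List.len params) 1).map (fun j =>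
        (pvEditDistance (PySem.List.pyGetD args i "") (PySem.List.pyGetD params j ""),
         i * PySem.List.len params + j))) = pvG args params := by
  rw [pvLen_min, PySem.List.len_eq, PySem.List.pyRange_zero_nat (pvKN args params),
      List.flatMap_map, pvG]
  congr 1
  funext i
  rw [PySem.List.pyRange_zero_nat, List.map_map]
  apply List.map_congr_left
  intro j _
  simp only [Function.comp_apply, pvEdge, pvCostF, PySem.List.pyGetD_natCast]

lemma pvAlt_eq (args params : List String) :
    optimal_cost_py_alt args params =
      ((pvRep (params.length : Int) (pvSL args params) (pvKN args params)
          (pvSt0 args params)).2.2,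
       (pvRep (params.length : Int) (pvSL args params) (pvKN args params)
          (pvSt0 args params)).1) := by
  have hfl : (PySem.List.pyRange 0 (min (PySem.List.len args) (PySem.List.len params)) 1).flatMap
      (fun i => (PySem.List.pyRange 0 (PySem.List.len params) 1).map (fun j =>
        (pvEditDistance (PySem.List.pyGetD args i "") (PySem.List.pyGetD params j ""),
         i * PySem.List.len params + j))) = pvG args params := pvEdges_eq args params
  have hscan := pvScanRep (P := (params.length : Int)) (pvSL args params)
      (pvSt0 args params) (pvKN args params)
      (fun e he => pvOKS_ok args params (pvSL_shape args params e he))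
      (by rw [pvSt0]; simp only; rw [pvFree_replicate])
  simp only [optimal_cost_py_alt]
  rw [hfl,
    show PySem.List.sorted2 (pvG args params) (fun e => e.1) (fun e => e.2) false =
      pvSL args params from rfl,
    pvInit_eq args params, PySem.List.len_eq,
    show (List.replicate (pvKN args params) (-1 : Int), (PySem.Set.empty : PySem.Set Int),
      (0 : Int)) = pvSt0 args params from rfl,
    hscan]

lemma pvGreedy_eq (args params : List String) (hpre : Pre_optimal_cost_py args params) :
    pvGreedy args params =
      (pvRep (params.length : Int) (pvSL args params) (pvKN args params)
        (pvSt0 args params)).1 := by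
  rw [pvGreedy]
  rw [pvFoldl_iterate, pvInit_eq]
  have hlen : (PySem.List.pyRange 0
      (min (PySem.List.len args) (PySem.List.len params)) 1).length = pvKN args params := by
    rw [pvLen_min, PySem.List.length_pyRange_one]
    omega
  rw [hlen]
  have := pvALoop args params hpre (pvKN args params)
    (List.replicate (pvKN args params) (-1 : Int)) PySem.Set.empty 0
  exact congrArg Prod.fst this

lemma pvAcost_eq (args params : List String) (asg : List Int)
    (hok : pvAsgOK params.length asg) (hlen : asg.length = pvKN args params) :
    (PySem.List.pyRange 0 (min (PySem.List.len args) (PySem.List.len params)) 1).foldl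
      (fun acc i =>
        if PySem.List.pyGetD asg i 0 ≠ -1 then
          acc + pvEditDistance (PySem.List.pyGetD args i "")
            (PySem.List.pyGetD params (PySem.List.pyGetD asg i 0) "")
        else acc) 0 = pvCostSum args params asg := by
  rw [pvLen_min, PySem.List.pyRange_zero_nat, List.foldl_map]
  rw [PySem.List.foldl_congr_mem _ _ (fun acc (i : Nat) =>
      acc + (if asg.getD i 0 ≠ -1 then pvCostF args params i ((asg.getD i 0).toNat) else 0)) _ ?_]
  · rw [PySem.List.foldl_add]
    rw [pvCostSum]
    simp
  · intro acc i hi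
    have hiK : i < pvKN args params := List.mem_range.mp hi
    have hilen : i < asg.length := by omega
    simp only [PySem.List.pyGetD_natCast]
    by_cases hval : asg.getD i 0 = -1
    · have hval' : asg[i]?.getD 0 = -1 := by rw [← List.getD_eq_getElem?_getD]; exact hval
      rw [if_neg (by simp [hval']), if_neg (by simp [hval'])]
      ring
    · have hval' : ¬ asg[i]?.getD 0 = -1 := by rw [← List.getD_eq_getElem?_getD]; exact hval
      rw [if_pos (by simp [hval']), if_pos (by simp [hval'])]
      have hmem : asg.getD i 0 ∈ asg := by
        rw [List.getD_eq_getElem asg 0 hilen]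
        exact List.getElem_mem hilen
      rcases hok _ hmem with h | ⟨j, hjP, hj⟩
      · exact absurd h hval
      · rw [hj, Int.toNat_natCast, PySem.List.pyGetD_natCast, pvCostF]

lemma pvCostSum_init (args params : List String) :
    pvCostSum args params (List.replicate (pvKN args params) (-1 : Int)) = 0 := by
  rw [pvCostSum]
  rw [List.map_congr_left (g := fun _ => (0 : Int)) ?_]
  · simp
  · intro i hi
    have hiK : i < pvKN args params := List.mem_range.mp hi
    have : (List.replicate (pvKN args params) (-1 : Int)).getD i 0 = -1 :=
      List.getD_replicate (-1 : Int) hiK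
    rw [List.getD_eq_getElem?_getD] at this
    rw [if_neg (by simp [this])]

-- ===== VERDICT (by name: the statement is the Claim_ definition above) =====
theorem optimal_cost_py_spec : Claim_equal_optimal_cost_py := by
  intro args params _ hpre
  unfold Spec_optimal_cost_py
  rw [pvAlt_eq args params]
  have hAsg : pvAsgOK params.length
      (pvRep (params.length : Int) (pvSL args params) (pvKN args params)
        (pvSt0 args params)).1 := by
    apply pvRep_AsgOK args params _ _ (pvSL_shape args params)
    intro x hx
    rw [pvSt0] at hx
    simp only at hx
    exact Or.inl (List.eq_of_mem_replicate hx)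
  have hlenR : (pvRep (params.length : Int) (pvSL args params) (pvKN args params)
      (pvSt0 args params)).1.length = pvKN args params := by
    rw [pvRep_length]
    simp [pvSt0]
  have htot : (pvRep (params.length : Int) (pvSL args params) (pvKN args params)
      (pvSt0 args params)).2.2 = pvCostSum args params
      (pvRep (params.length : Int) (pvSL args params) (pvKN args params)
        (pvSt0 args params)).1 := by
    apply pvRep_total args params _ _ (pvSL_shape args params)
    rw [pvSt0]
    simp only
    exact (pvCostSum_init args params).symm
  simp only [optimal_cost_py]
  rw [pvGreedy_eq args params hpre, pvAcost_eq args params _ hAsg hlenR, ← htot]
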